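-- pv_equiv track=rewrite | github.com/rafaelmagesty/EngSoft-Pratica5 | src/math_utils.py | sum_even_numbers
-- ===== SOURCE A (Python) =====
-- from typing import Iterable, Sequence
--
-- def sum_even_numbers(numeros: Iterable[int]) -> int:
--     """
--     Soma apenas os números pares de uma sequência de inteiros.
--     """
--     if numeros is None:
--         raise ValueError("A sequência de números não pode ser nula.")
--     soma = 0
--     for numero in numeros:
--         if not isinstance(numero, int):
--             raise TypeError("Todos os elementos precisam ser inteiros.")
--         if numero % 2 == 0:
--             soma += numero
--     return soma
-- ===== SOURCE B (Python) =====
-- def sum_even_numbers(numeros):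
--     if numeros is None:
--         raise ValueError("A sequência de números não pode ser nula.")
--     nums = list(numeros)
--     for n in nums:
--         if not isinstance(n, int):
--             raise TypeError("Todos os elementos precisam ser inteiros.")
--     return sum(n for n in nums if n % 2 == 0)
-- ===== Notes on version B (the rewrite author's own statement) =====
-- stated objective: idiomatic
-- what changed: Replaces the single interleaved validate-and-accumulate loop with a validation pass over a materialized list followed by a sum() over a filtering generator.
import Mathlib
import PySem

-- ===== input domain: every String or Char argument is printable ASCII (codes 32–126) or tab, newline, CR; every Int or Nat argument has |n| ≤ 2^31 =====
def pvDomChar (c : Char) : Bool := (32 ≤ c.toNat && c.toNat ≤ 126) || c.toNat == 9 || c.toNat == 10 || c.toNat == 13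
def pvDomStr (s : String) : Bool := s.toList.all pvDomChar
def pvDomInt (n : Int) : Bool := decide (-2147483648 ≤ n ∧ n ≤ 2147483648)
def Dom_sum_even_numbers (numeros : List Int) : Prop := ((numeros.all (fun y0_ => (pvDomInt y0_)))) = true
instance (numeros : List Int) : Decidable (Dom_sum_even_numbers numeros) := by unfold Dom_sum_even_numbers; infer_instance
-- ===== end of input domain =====

-- B replaces A's interleaved validate-and-accumulate loop by a validation pass
-- plus a sum over a filtering comprehension (same return value; the None/isinstance
-- guards never fire on List Int, so both ports are total here).

-- ===== PORT A =====
-- single loop: accumulate soma, adding even elements (Python n % 2 with PySem.Int.mod)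
def sum_even_numbers (numeros : List Int) : Int :=
  numeros.foldl (fun soma numero =>
    if PySem.Int.mod numero 2 = 0 then soma + numero else soma) 0

-- ===== PORT B =====
-- sum of a filtering pass (the validation loop has no effect on List Int)
def sum_even_numbers_alt (numeros : List Int) : Int :=
  (numeros.filter (fun n => PySem.Int.mod n 2 == 0)).sum

-- ===== PRECONDITION & SPEC =====
def Spec_sum_even_numbers (numeros : List Int) (out : Int) : Prop := out = sum_even_numbers_alt numeros
instance (numeros : List Int) (out : Int) : Decidable (Spec_sum_even_numbers numeros out) := by unfold Spec_sum_even_numbers; infer_instance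

-- ===== CLAIM (what is proved, stated in full; the proofs are below) =====
def Claim_equal_sum_even_numbers : Prop := ∀ (numeros : List Int), Dom_sum_even_numbers numeros → Spec_sum_even_numbers numeros (sum_even_numbers numeros)

-- ===== LEMMAS AND PROOFS =====
theorem sum_even_foldl (numeros : List Int) (acc : Int) :
    numeros.foldl (fun soma numero =>
      if PySem.Int.mod numero 2 = 0 then soma + numero else soma) acc
      = acc + (numeros.filter (fun n => PySem.Int.mod n 2 == 0)).sum := by
  induction numeros generalizing acc with
  | nil => simp
  | cons x xs ih =>
    rw [List.foldl_cons, List.filter_cons, ih]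
    by_cases h : PySem.Int.mod x 2 = 0
    · rw [if_pos h, if_pos (by simp [PySem.Int.mod] at h ⊢; omega), List.sum_cons]; ring
    · rw [if_neg h, if_neg (by simp [PySem.Int.mod] at h ⊢; omega)]

-- ===== VERDICT (by name: the statement is the Claim_ definition above) =====
theorem sum_even_numbers_spec : Claim_equal_sum_even_numbers := by
  intro numeros _
  unfold Spec_sum_even_numbers sum_even_numbers sum_even_numbers_alt
  simpa using sum_even_foldl numeros 0
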